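-- pv_equiv track=rewrite | github.com/monist-david/knowledge | searching/views.py | all_in_keywords_English
-- ===== SOURCE A (Python) =====
-- def all_in_keywords_English(search_words_weight, all_keywords):
--     list_search_words_weight = list(search_words_weight)
--     results = []
--     for index in range(len(list_search_words_weight)):
--         results.append(False)
--     for keyword in all_keywords:
--         for index in range(len(list_search_words_weight)):
--             if list_search_words_weight[index] in keyword:
--                 results[index] = True
--             else:
--                 pass
--     final_result = True
--     for result in results:
--         final_result = final_result and result
--     return final_result
-- ===== SOURCE B (Python) =====
-- def all_in_keywords_English(search_words_weight, all_keywords):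
--     return all(
--         any(word in keyword for keyword in all_keywords)
--         for word in list(search_words_weight)
--     )
-- ===== Notes on version B (the rewrite author's own statement) =====
-- stated objective: idiomatic
-- what changed: Replaced the keyword-outer pass maintaining a results array of per-word flags with a word-outer all/any existential scan that short-circuits on the first matching keyword and the first failing word.
import Mathlib
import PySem

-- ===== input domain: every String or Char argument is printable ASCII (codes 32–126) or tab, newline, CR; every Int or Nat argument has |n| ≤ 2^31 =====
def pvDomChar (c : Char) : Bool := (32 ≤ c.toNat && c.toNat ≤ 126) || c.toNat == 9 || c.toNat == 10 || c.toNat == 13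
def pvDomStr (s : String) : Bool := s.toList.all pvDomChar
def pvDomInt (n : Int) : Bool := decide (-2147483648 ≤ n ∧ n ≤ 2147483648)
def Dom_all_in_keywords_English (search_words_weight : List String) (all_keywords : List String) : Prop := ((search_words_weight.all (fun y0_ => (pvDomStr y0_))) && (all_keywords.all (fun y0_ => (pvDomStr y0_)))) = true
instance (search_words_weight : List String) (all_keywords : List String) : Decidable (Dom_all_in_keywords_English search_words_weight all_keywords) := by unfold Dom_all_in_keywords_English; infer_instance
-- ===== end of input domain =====

-- B replaces A's keyword-outer pass over a maintained array of per-word flags with a word-outer all/any existential scan (idiomatic, no accumulator list); same return value on every input.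


-- ===== PORT A =====
def all_in_keywords_English (search_words_weight : List String) (all_keywords : List String) : Bool :=
  let list_search_words_weight := search_words_weight
  let results : List Bool :=
    (PySem.List.pyRange 0 list_search_words_weight.length 1).foldl
      (fun acc _ => acc ++ [false]) []
  let results := all_keywords.foldl
    (fun res keyword =>
      (PySem.List.pyRange 0 list_search_words_weight.length 1).foldl
        (fun r idx =>
          match PySem.List.pyGet? list_search_words_weight idx with
          | some w => if PySem.Str.isIn w keyword then r.set idx.toNat true else r
          | none => r)
        res)
    results
  results.foldl (fun final_result result => final_result && result) true

-- ===== PORT B =====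
def all_in_keywords_English_alt (search_words_weight : List String) (all_keywords : List String) : Bool :=
  search_words_weight.all (fun word => all_keywords.any (fun keyword => PySem.Str.isIn word keyword))

-- ===== PRECONDITION & SPEC =====
def Spec_all_in_keywords_English (search_words_weight : List String) (all_keywords : List String) (out : Bool) : Prop := out = all_in_keywords_English_alt search_words_weight all_keywords
instance (search_words_weight : List String) (all_keywords : List String) (out : Bool) : Decidable (Spec_all_in_keywords_English search_words_weight all_keywords out) := by unfold Spec_all_in_keywords_English; infer_instance

-- ===== CLAIM (what is proved, stated in full; the proofs are below) =====
def Claim_equal_all_in_keywords_English : Prop := ∀ (search_words_weight : List String) (all_keywords : List String), Dom_all_in_keywords_English search_words_weight all_keywords → Spec_all_in_keywords_English search_words_weight all_keywords (all_in_keywords_English search_words_weight all_keywords)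

-- ===== LEMMAS AND PROOFS =====

-- building the initial all-False results list: append-fold = map to false
theorem pvInitFold {α β : Type} (l : List α) (a : List β) (c : β) :
    l.foldl (fun acc _ => acc ++ [c]) a = a ++ l.map (fun _ => c) := by
  induction l generalizing a with
  | nil => simp
  | cons x xs ih => simp [List.foldl_cons, ih]

-- a fold whose step preserves a fixed head factors through the tail
theorem pvFoldlConsHead {α β : Type} (h g : List β → α → List β) (c : β)
    (hcomm : ∀ s i, h (c :: s) i = c :: g s i) :
    ∀ (l : List α) (r : List β), l.foldl h (c :: r) = c :: l.foldl g r := by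
  intro l
  induction l with
  | nil => intro r; simp
  | cons x xs ih => intro r; simp [List.foldl_cons, hcomm, ih]

-- the inner index loop of A, acting on a map-shaped accumulator
theorem pvInnerLoop (kw : String) :
    ∀ (lsw : List String) (f : String → Bool),
      (List.range lsw.length).foldl
        (fun r i => match PySem.List.pyGet? lsw ((i : Nat) : Int) with
          | some w => if PySem.Str.isIn w kw then r.set ((i : Nat) : Int).toNat true else r
          | none => r)
        (lsw.map f)
      = lsw.map (fun w => f w || PySem.Str.isIn w kw) := by
  intro lsw
  induction lsw with
  | nil => intro f; simp
  | cons w ws ih =>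
    intro f
    rw [List.length_cons, List.range_succ_eq_map, List.foldl_cons, List.foldl_map]
    have h0 : PySem.List.pyGet? (w :: ws) ((0 : Nat) : Int) = some w := by
      rw [PySem.List.pyGet?_natCast]; rfl
    rw [h0]
    have hcomm : ∀ (c : Bool) (s : List Bool) (i : Nat),
        (fun (r : List Bool) (i : Nat) =>
          match PySem.List.pyGet? (w :: ws) ((Nat.succ i : Nat) : Int) with
          | some v => if PySem.Str.isIn v kw then r.set ((Nat.succ i : Nat) : Int).toNat true else r
          | none => r) (c :: s) i
        = c :: (fun (r : List Bool) (i : Nat) =>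
          match PySem.List.pyGet? ws ((i : Nat) : Int) with
          | some v => if PySem.Str.isIn v kw then r.set ((i : Nat) : Int).toNat true else r
          | none => r) s i := by
      intro c s i
      have hg : PySem.List.pyGet? (w :: ws) ((Nat.succ i : Nat) : Int)
          = PySem.List.pyGet? ws ((i : Nat) : Int) := by
        rw [PySem.List.pyGet?_natCast, PySem.List.pyGet?_natCast]; simp
      simp only [hg]
      cases hv : PySem.List.pyGet? ws ((i : Nat) : Int) with
      | none => rfl
      | some v =>
        simp [Nat.succ_eq_add_one, apply_ite (List.cons c)]
    by_cases hin : PySem.Str.isIn w kw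
    · simp only [hin, if_true, List.map_cons, Int.toNat_natCast, List.set]
      rw [pvFoldlConsHead _ _ true (hcomm true) (List.range ws.length) (ws.map f), ih f]
      simp
    · simp only [hin, Bool.false_eq_true, if_false, List.map_cons]
      rw [pvFoldlConsHead _ _ (f w) (hcomm (f w)) (List.range ws.length) (ws.map f), ih f]
      simp

-- the keyword loop of A keeps a map-shaped accumulator
theorem pvOuterLoop (lsw : List String) :
    ∀ (ak : List String) (f : String → Bool),
      ak.foldl
        (fun res keyword =>
          (List.range lsw.length).foldl
            (fun r i =>
              match PySem.List.pyGet? lsw ((i : Nat) : Int) with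
              | some w => if PySem.Str.isIn w keyword then r.set ((i : Nat) : Int).toNat true else r
              | none => r)
            res)
        (lsw.map f)
      = lsw.map (fun w => f w || ak.any (fun k => PySem.Str.isIn w k)) := by
  intro ak
  induction ak with
  | nil => intro f; simp
  | cons kw aks ih =>
    intro f
    rw [List.foldl_cons, pvInnerLoop kw lsw f, ih]
    simp [Bool.or_assoc]

-- final conjunction fold = all
theorem pvFoldlAnd : ∀ (l : List Bool) (a : Bool),
    l.foldl (fun x y => x && y) a = (a && l.all id) := by
  intro l
  induction l with
  | nil => intro a; simp
  | cons b bs ih => intro a; simp [List.foldl_cons, ih, Bool.and_assoc]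

-- ===== VERDICT (by name: the statement is the Claim_ definition above) =====
theorem all_in_keywords_English_spec : Claim_equal_all_in_keywords_English := by
  intro sw ak _
  unfold Spec_all_in_keywords_English all_in_keywords_English all_in_keywords_English_alt
  have hinit : (PySem.List.pyRange 0 (sw.length : Int) 1).foldl
      (fun (acc : List Bool) _ => acc ++ [false]) []
      = sw.map (fun _ => false) := by
    rw [pvInitFold, PySem.List.pyRange_zero_natCast]
    simp
  simp only []
  rw [hinit, PySem.List.pyRange_zero_natCast]
  simp only [List.foldl_map]
  rw [pvOuterLoop sw ak (fun _ => false), pvFoldlAnd]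
  simp [List.all_map]
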